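-- pv_equiv track=rewrite | github.com/franzoom/offline-liturgy | scripts/extract_evangelic_antiphons.py | find_oration_end
-- ===== SOURCE A (Python) =====
-- def is_root_key(line):
--     """Check if a line is a root-level YAML key."""
--     stripped = line.rstrip("\n")
--     return stripped and not stripped[0].isspace() and ":" in stripped and not stripped.startswith("#")
--
-- def find_oration_end(lines):
--     """Find the line index right after the oration block at root level."""
--     in_oration = False
--     for i, line in enumerate(lines):
--         stripped = line.rstrip("\n")
--         if is_root_key(stripped) and stripped.startswith("oration:"):
--             in_oration = True
--             continue
--         if in_oration and is_root_key(stripped):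
--             return i
--     # If oration is last root key, return end
--     if in_oration:
--         return len(lines)
--     return None
-- ===== SOURCE B (Python) =====
-- def is_root_key(line):
--     """Check if a line is a root-level YAML key."""
--     stripped = line.rstrip("\n")
--     return stripped and not stripped[0].isspace() and ":" in stripped and not stripped.startswith("#")
--
-- def find_oration_end(lines):
--     """Find the line index right after the oration block at root level."""
--     roots = [(i, line.rstrip("\n")) for i, line in enumerate(lines) if is_root_key(line)]
--     oration = next((i for i, s in roots if s.startswith("oration:")), None)
--     if oration is None:
--         return None
--     for i, s in roots:
--         if i > oration and not s.startswith("oration:"):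
--             return i
--     return len(lines)
-- ===== Notes on version B (the rewrite author's own statement) =====
-- stated objective: alternative
-- what changed: Replaced the fused boolean-flag state-machine loop with an index-building pass (collect all root-level keys with their indices) followed by two shaped searches: first oration root key, then the first later non-oration root key (len(lines) if none).
import Mathlib
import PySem

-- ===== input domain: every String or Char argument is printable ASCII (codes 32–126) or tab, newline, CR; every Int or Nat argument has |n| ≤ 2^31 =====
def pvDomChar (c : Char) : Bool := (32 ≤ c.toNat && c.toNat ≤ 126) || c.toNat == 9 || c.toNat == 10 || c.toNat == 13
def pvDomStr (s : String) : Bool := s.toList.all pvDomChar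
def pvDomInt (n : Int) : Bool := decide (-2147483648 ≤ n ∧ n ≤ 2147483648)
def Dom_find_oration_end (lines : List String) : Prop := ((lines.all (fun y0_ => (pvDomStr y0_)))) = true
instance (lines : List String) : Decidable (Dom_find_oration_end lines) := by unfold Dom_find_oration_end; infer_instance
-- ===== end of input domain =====

-- B replaces A's fused state-machine loop by an index-building pass over the root-level keys
-- plus two searches over that index (alternative decomposition; same cost).

-- ===== PORT A =====
-- hand port of str.rstrip("\n") (PySem has no rstrip-with-chars form): drop trailing '\n'; exact
def rstripNl (cs : List Char) : List Char := List.rdropWhile (fun c => c == '\n') cs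

def is_root_key (line : List Char) : Bool :=
  let stripped := rstripNl line
  match stripped with
  | [] => false  -- Python: empty string is falsy, short-circuits the 'and' chain
  | c :: _ =>
      !PySem.Chars.isspace c && PySem.Chars.isIn [':'] stripped &&
        !PySem.Chars.startswith stripped ['#']

def find_oration_end_aux (i : Int) (in_oration : Bool) : List String → Option Int
  | [] => if in_oration then some i else none  -- end of loop: i = len(lines) here
  | line :: rest =>
    let stripped := rstripNl line.toList
    if is_root_key stripped && PySem.Chars.startswith stripped "oration:".toList then
      find_oration_end_aux (i + 1) true rest
    else if in_oration && is_root_key stripped then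
      some i
    else
      find_oration_end_aux (i + 1) in_oration rest

def find_oration_end (lines : List String) : Option Int :=
  find_oration_end_aux 0 false lines

-- ===== PORT B =====
def find_oration_end_alt (lines : List String) : Option Int :=
  let roots := ((PySem.List.enumerate lines).filter (fun p => is_root_key p.2.toList)).map
      (fun p => (p.1, rstripNl p.2.toList))
  match roots.find? (fun p => PySem.Chars.startswith p.2 "oration:".toList) with
  | none => none
  | some q =>
    match roots.find? (fun p =>
        decide (q.1 < p.1) && !PySem.Chars.startswith p.2 "oration:".toList) with
    | some p => some p.1
    | none => some (lines.length : Int)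

-- ===== PRECONDITION & SPEC =====
def Spec_find_oration_end (lines : List String) (out : Option Int) : Prop := out = find_oration_end_alt lines
instance (lines : List String) (out : Option Int) : Decidable (Spec_find_oration_end lines out) := by unfold Spec_find_oration_end; infer_instance

-- ===== CLAIM (what is proved, stated in full; the proofs are below) =====
def Claim_equal_find_oration_end : Prop := ∀ (lines : List String), Dom_find_oration_end lines → Spec_find_oration_end lines (find_oration_end lines)

-- ===== LEMMAS AND PROOFS =====

-- abbreviations used only in the proofs
def pvRoots (i : Int) (lines : List String) : List (Int × List Char) :=
  ((PySem.List.enumerate lines i).filter (fun p => is_root_key p.2.toList)).map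
    (fun p => (p.1, rstripNl p.2.toList))

def pvOr : List Char := "oration:".toList

-- B's body, generalized to an arbitrary starting index
def pvBgen (i : Int) (lines : List String) : Option Int :=
  match (pvRoots i lines).find? (fun p => PySem.Chars.startswith p.2 pvOr) with
  | none => none
  | some q =>
    match (pvRoots i lines).find? (fun p =>
        decide (q.1 < p.1) && !PySem.Chars.startswith p.2 pvOr) with
    | some p => some p.1
    | none => some (i + lines.length)

theorem is_root_key_rstrip (s : List Char) : is_root_key (rstripNl s) = is_root_key s := by
  simp [is_root_key, rstripNl, List.rdropWhile_idempotent]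

theorem mem_enumerate_le {α : Type} (lines : List α) (i : Int) :
    ∀ p ∈ PySem.List.enumerate lines i, i ≤ p.1 := by
  induction lines generalizing i with
  | nil => simp [PySem.List.enumerate]
  | cons l rest ih =>
    intro p hp
    simp only [PySem.List.enumerate, List.mem_cons] at hp
    rcases hp with h | h
    · simp [h]
    · have := ih (i + 1) p h; omega

theorem mem_pvRoots_le (lines : List String) (i : Int) :
    ∀ p ∈ pvRoots i lines, i ≤ p.1 := by
  intro p hp
  simp only [pvRoots, List.mem_map, List.mem_filter] at hp
  obtain ⟨q, ⟨hq, _⟩, rfl⟩ := hp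
  exact mem_enumerate_le lines i q hq

theorem pvRoots_cons (l : String) (rest : List String) (i : Int) :
    pvRoots i (l :: rest) =
      if is_root_key l.toList then
        (i, rstripNl l.toList) :: pvRoots (i + 1) rest
      else pvRoots (i + 1) rest := by
  simp only [pvRoots, PySem.List.enumerate, List.filter_cons]
  split_ifs with h
  · simp
  · simp

-- cast arithmetic for the list-length in the loop-end branch
theorem pvLen (i : Int) (n : Nat) : i + ((n + 1 : Nat) : Int) = i + 1 + (n : Int) := by
  push_cast; ring

-- after the flag is set: A returns the first root key from index i on that is not an
-- oration key (else i + len); B's second search does the same once q < i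
theorem aux_true_eq (lines : List String) (i q : Int) (hq : q < i) :
    find_oration_end_aux i true lines =
      (match (pvRoots i lines).find? (fun p =>
          decide (q < p.1) && !PySem.Chars.startswith p.2 pvOr) with
      | some p => some p.1
      | none => some (i + lines.length)) := by
  induction lines generalizing i q with
  | nil => simp [find_oration_end_aux, pvRoots, PySem.List.enumerate]
  | cons l rest ih =>
    rw [show (find_oration_end_aux i true (l :: rest)) =
      (let stripped := rstripNl l.toList
       if is_root_key stripped && PySem.Chars.startswith stripped "oration:".toList then
         find_oration_end_aux (i + 1) true rest
       else if true && is_root_key stripped then some i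
       else find_oration_end_aux (i + 1) true rest) from rfl]
    rw [pvRoots_cons]
    simp only [is_root_key_rstrip, show "oration:".toList = pvOr from rfl,
      List.length_cons, pvLen]
    by_cases hr : is_root_key l.toList
    · rw [if_pos hr]
      by_cases hs : PySem.Chars.startswith (rstripNl l.toList) pvOr
      · -- oration root key: skipped by both
        rw [if_pos (by simp [hr, hs]),
            List.find?_cons_of_neg (by simp [hs]),
            ih (i + 1) q (by omega)]
      · -- non-oration root key after the flag: A returns i, B's search finds (i, …)
        rw [if_neg (by simp [hs]), if_pos (by simp [hr]),
            List.find?_cons_of_pos (by simp [hs, hq])]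
    · -- not a root key: both skip the line
      rw [if_neg hr, if_neg (by simp [hr]), if_neg (by simp [hr]),
          ih (i + 1) q (by omega)]

theorem aux_false_eq (lines : List String) (i : Int) :
    find_oration_end_aux i false lines = pvBgen i lines := by
  induction lines generalizing i with
  | nil => simp [find_oration_end_aux, pvBgen, pvRoots, PySem.List.enumerate]
  | cons l rest ih =>
    rw [show (find_oration_end_aux i false (l :: rest)) =
      (let stripped := rstripNl l.toList
       if is_root_key stripped && PySem.Chars.startswith stripped "oration:".toList then
         find_oration_end_aux (i + 1) true rest
       else if false && is_root_key stripped then some i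
       else find_oration_end_aux (i + 1) false rest) from rfl]
    simp only [is_root_key_rstrip, show "oration:".toList = pvOr from rfl,
      Bool.false_and, Bool.false_eq_true, if_false]
    unfold pvBgen
    rw [pvRoots_cons]
    simp only [List.length_cons, pvLen]
    by_cases hr : is_root_key l.toList
    · rw [if_pos hr]
      by_cases hs : PySem.Chars.startswith (rstripNl l.toList) pvOr
      · -- first oration root key found here, at index i
        rw [if_pos (by simp [hr, hs]),
            List.find?_cons_of_pos (by simpa using hs)]
        simp only
        rw [List.find?_cons_of_neg (by simp),
            aux_true_eq rest (i + 1) i (by omega)]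
      · -- non-oration root key before any oration key: B's second search skips its
        -- entry too, since its index is below any oration index found later
        rw [if_neg (by simp [hs]),
            List.find?_cons_of_neg (by simpa using hs), ih (i + 1)]
        unfold pvBgen
        rcases hfind : (pvRoots (i + 1) rest).find? (fun p => PySem.Chars.startswith p.2 pvOr) with _ | q
        · rw [hfind]
        · have hqi : i + 1 ≤ q.1 :=
            mem_pvRoots_le rest (i + 1) q (List.mem_of_find?_eq_some hfind)
          rw [hfind]
          simp only
          rw [List.find?_cons_of_neg (by simp [hs]; omega)]
    · rw [if_neg hr, if_neg (by simp [hr]), ih (i + 1)]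
      unfold pvBgen
      rfl

-- ===== VERDICT (by name: the statement is the Claim_ definition above) =====
theorem find_oration_end_spec : Claim_equal_find_oration_end := by
  intro lines _
  unfold Spec_find_oration_end find_oration_end
  rw [aux_false_eq lines 0]
  simp only [pvBgen, find_oration_end_alt, pvRoots, pvOr, zero_add]
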